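-- pv_equiv track=rewrite | github.com/shirish-verma/practicals_movie_asst | ma_practical_m2.py | chinese_zodiac
-- ===== SOURCE A (Python) =====
-- def chinese_zodiac(b_year):
--     zodiac_dict = {
--         'Rat' : [1948, 1960, 1972, 1984, 1996, 2008, 2020],
--         'Ox' : [1949, 1961, 1973, 1985, 1997, 2009, 2021],
--         'Tiger' : [1950, 1962, 1974, 1986, 1998, 2010, 2022],
--         'Rabbit' :	[1951, 1963, 1975, 1987, 1999, 2011, 2023],
--         'Dragon' :	[1952, 1964, 1976, 1988, 2000, 2012, 2024],
--         'Snake' :	[1953, 1965, 1977, 1989, 2001, 2013, 2025],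
--         'Horse' :	[1954, 1966, 1978, 1990, 2002, 2014, 2026],
--         'Goat' :	[1955, 1967, 1979, 1991, 2003, 2015, 2027],
--         'Monkey' :	[1956, 1968, 1980, 1992, 2004, 2016, 2028],
--         'Rooster' :	[1957, 1969, 1981, 1993, 2005, 2017, 2029],
--         'Dog' :	[1958, 1970, 1982, 1994, 2006, 2018, 2030],
--         'Pig' : [1959, 1971, 1983, 1995, 2007, 2019, 2031]
--         }
--     for zodiac_sign, zodiac_year_list in zodiac_dict.items():
--         if type(b_year) is not int or b_year < 1948 or b_year > 2031:
--             return 'Birth year invalid or out of range!'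
--         elif b_year in zodiac_year_list:
--             return f'{b_year} is the year of the {zodiac_sign}'
-- ===== SOURCE B (Python) =====
-- def chinese_zodiac(b_year):
--     if type(b_year) is not int or b_year < 1948 or b_year > 2031:
--         return 'Birth year invalid or out of range!'
--     signs = ['Rat', 'Ox', 'Tiger', 'Rabbit', 'Dragon', 'Snake',
--              'Horse', 'Goat', 'Monkey', 'Rooster', 'Dog', 'Pig']
--     return f'{b_year} is the year of the {signs[(b_year - 1948) % 12]}'
-- ===== Notes on version B (the rewrite author's own statement) =====
-- stated objective: simpler
-- what changed: Replaces the per-sign year-table scan (dict of sign to list of member years, membership test per entry) with direct modular indexing of the year's offset from the first table year into an ordered sign list.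
import Mathlib
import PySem

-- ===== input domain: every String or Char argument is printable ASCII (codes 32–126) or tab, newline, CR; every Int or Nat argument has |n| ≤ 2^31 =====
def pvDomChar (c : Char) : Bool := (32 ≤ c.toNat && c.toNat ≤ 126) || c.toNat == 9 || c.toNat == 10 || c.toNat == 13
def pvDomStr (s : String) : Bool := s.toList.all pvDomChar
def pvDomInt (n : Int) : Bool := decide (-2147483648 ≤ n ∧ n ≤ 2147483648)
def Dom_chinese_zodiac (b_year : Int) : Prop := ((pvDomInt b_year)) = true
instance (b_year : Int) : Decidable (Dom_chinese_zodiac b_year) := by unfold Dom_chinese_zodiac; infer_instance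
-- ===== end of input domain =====

-- B replaces A's 12-entry table scan with direct modular indexing into an ordered sign list (simpler).

-- ===== PORT A =====
def zodiacTable : List (String × List Int) :=
  [("Rat", [1948, 1960, 1972, 1984, 1996, 2008, 2020]),
  ("Ox", [1949, 1961, 1973, 1985, 1997, 2009, 2021]),
  ("Tiger", [1950, 1962, 1974, 1986, 1998, 2010, 2022]),
  ("Rabbit", [1951, 1963, 1975, 1987, 1999, 2011, 2023]),
  ("Dragon", [1952, 1964, 1976, 1988, 2000, 2012, 2024]),
  ("Snake", [1953, 1965, 1977, 1989, 2001, 2013, 2025]),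
  ("Horse", [1954, 1966, 1978, 1990, 2002, 2014, 2026]),
  ("Goat", [1955, 1967, 1979, 1991, 2003, 2015, 2027]),
  ("Monkey", [1956, 1968, 1980, 1992, 2004, 2016, 2028]),
  ("Rooster", [1957, 1969, 1981, 1993, 2005, 2017, 2029]),
  ("Dog", [1958, 1970, 1982, 1994, 2006, 2018, 2030]),
  ("Pig", [1959, 1971, 1983, 1995, 2007, 2019, 2031])]

-- the 'for zodiac_sign, zodiac_year_list in zodiac_dict.items():' loop, item by item
def zodiacLoopA (b_year : Int) : List (String × List Int) → Option String
  | [] => none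
  | (sign, yrs) :: rest =>
    if b_year < 1948 ∨ b_year > 2031 then
      some "Birth year invalid or out of range!"
    else if b_year ∈ yrs then
      some (PySem.Int.toStr b_year ++ " is the year of the " ++ sign)
    else zodiacLoopA b_year rest

def chinese_zodiac (b_year : Int) : Option String :=
  zodiacLoopA b_year zodiacTable

-- ===== PORT B =====
def zodiacSigns : List String :=
  ["Rat", "Ox", "Tiger", "Rabbit", "Dragon", "Snake",
   "Horse", "Goat", "Monkey", "Rooster", "Dog", "Pig"]

def chinese_zodiac_alt (b_year : Int) : Option String :=
  if b_year < 1948 ∨ b_year > 2031 then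
    some "Birth year invalid or out of range!"
  else
    match PySem.List.pyGet? zodiacSigns (PySem.Int.mod (b_year - 1948) 12) with
    | some sign => some (PySem.Int.toStr b_year ++ " is the year of the " ++ sign)
    | none => none

-- ===== PRECONDITION & SPEC =====
def Spec_chinese_zodiac (b_year : Int) (out : Option String) : Prop := out = chinese_zodiac_alt b_year
instance (b_year : Int) (out : Option String) : Decidable (Spec_chinese_zodiac b_year out) := by unfold Spec_chinese_zodiac; infer_instance

-- ===== CLAIM (what is proved, stated in full; the proofs are below) =====
def Claim_equal_chinese_zodiac : Prop := ∀ (b_year : Int), Dom_chinese_zodiac b_year → Spec_chinese_zodiac b_year (chinese_zodiac b_year)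

-- ===== LEMMAS AND PROOFS =====

-- both ports return the invalid-range message on out-of-range input
theorem both_invalid (b_year : Int) (h : b_year < 1948 ∨ b_year > 2031) :
    chinese_zodiac b_year = chinese_zodiac_alt b_year := by
  simp [chinese_zodiac, chinese_zodiac_alt, zodiacTable, zodiacLoopA, h]

-- ===== VERDICT (by name: the statement is the Claim_ definition above) =====
theorem chinese_zodiac_spec : Claim_equal_chinese_zodiac := by
  intro b_year _
  unfold Spec_chinese_zodiac
  by_cases h : b_year < 1948 ∨ b_year > 2031
  · exact both_invalid b_year h
  · have h1 : 1948 ≤ b_year := by omega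
    have h2 : b_year ≤ 2031 := by omega
    interval_cases b_year <;> decide
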